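-- pv_equiv track=rewrite | github.com/Simulation-Intelligence/PAT3D | pat3d/metrics/semantics/render/compute_render.py | _summarize_blender_failure
-- ===== SOURCE A (Python) =====
-- def _summarize_blender_failure(stdout: str, stderr: str) -> str | None:
--     ignored_prefixes = (
--         "Blender ",
--         "Blender quit",
--         "Read prefs:",
--         "Read blend:",
--         "Info:",
--         "xcb_connection_has_error()",
--     )
--     for stream in (stderr, stdout):
--         lines = [line.strip() for line in stream.splitlines() if line.strip()]
--         if not lines:
--             continue
--         traceback_index = next((index for index, line in enumerate(lines) if line.startswith("Traceback")), None)
--         relevant_lines = lines[traceback_index + 1 :] if traceback_index is not None else lines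
--         for line in reversed(relevant_lines):
--             if line.startswith(ignored_prefixes):
--                 continue
--             return line
--     return None
-- ===== SOURCE B (Python) =====
-- def _summarize_blender_failure(stdout: str, stderr: str) -> str | None:
--     ignored_prefixes = (
--         "Blender ",
--         "Blender quit",
--         "Read prefs:",
--         "Read blend:",
--         "Info:",
--         "xcb_connection_has_error()",
--     )
--     for stream in (stderr, stdout):
--         candidate = None
--         seen_traceback = False
--         for raw in stream.splitlines():
--             line = raw.strip()
--             if not line:
--                 continue
--             if not seen_traceback and line.startswith("Traceback"):
--                 seen_traceback = True
--                 candidate = None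
--             elif not line.startswith(ignored_prefixes):
--                 candidate = line
--         if candidate is not None:
--             return candidate
--     return None
-- ===== Notes on version B (the rewrite author's own statement) =====
-- stated objective: alternative
-- what changed: Replaces A's pre-pass (strip+filter list build, explicit first-Traceback index lookup, slice, reverse scan) with a single forward pass over the raw lines maintaining a candidate and a seen-traceback flag.
import Mathlib
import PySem

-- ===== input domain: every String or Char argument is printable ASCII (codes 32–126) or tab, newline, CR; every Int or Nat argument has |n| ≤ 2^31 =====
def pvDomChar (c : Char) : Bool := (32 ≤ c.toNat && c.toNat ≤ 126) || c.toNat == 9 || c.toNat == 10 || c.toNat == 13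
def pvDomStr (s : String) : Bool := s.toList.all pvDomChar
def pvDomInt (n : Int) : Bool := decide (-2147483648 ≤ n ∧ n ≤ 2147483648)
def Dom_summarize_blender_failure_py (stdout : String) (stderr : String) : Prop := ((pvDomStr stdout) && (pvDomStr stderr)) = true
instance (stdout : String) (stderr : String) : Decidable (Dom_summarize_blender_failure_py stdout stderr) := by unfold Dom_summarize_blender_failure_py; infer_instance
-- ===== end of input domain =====

-- B replaces A's list build + traceback-index lookup + slice + reverse scan by one
-- forward pass keeping a candidate and a seen-traceback flag (objective: alternative).

-- ===== PORT A =====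
def pvIgnoredPrefixesA : List String :=
  ["Blender ", "Blender quit", "Read prefs:", "Read blend:", "Info:", "xcb_connection_has_error()"]

-- line.startswith(ignored_prefixes) — a tuple argument means "starts with any of them"
def pvIgnoredA (line : String) : Bool := pvIgnoredPrefixesA.any (fun p => PySem.Str.startswith line p)

-- [line.strip() for line in stream.splitlines() if line.strip()]
def pvLinesA (stream : String) : List String :=
  ((PySem.Str.splitlines stream).map PySem.Str.strip).filter (fun l => l != "")

-- next((index for index, line in enumerate(lines) if line.startswith("Traceback")), None)
def pvTracebackIndexA (lines : List String) : Option Nat :=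
  lines.findIdx? (fun l => PySem.Str.startswith l "Traceback")

-- one iteration of A's outer loop: returns the line found for this stream, or none ("continue")
def pvStreamA (stream : String) : Option String :=
  let lines := pvLinesA stream
  if lines = [] then none
  else
    let relevant :=
      match pvTracebackIndexA lines with
      | some i => lines.drop (i + 1)
      | none => lines
    -- for line in reversed(relevant): if line.startswith(ignored_prefixes): continue; return line
    relevant.reverse.find? (fun l => !pvIgnoredA l)

def summarize_blender_failure_py (stdout : String) (stderr : String) : Option String :=
  match pvStreamA stderr with
  | some line => some line
  | none => pvStreamA stdout

-- ===== PORT B =====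
def pvIgnoredPrefixesB : List String :=
  ["Blender ", "Blender quit", "Read prefs:", "Read blend:", "Info:", "xcb_connection_has_error()"]

def pvIgnoredB (line : String) : Bool := pvIgnoredPrefixesB.any (fun p => PySem.Str.startswith line p)

-- B's inner loop body: state = (candidate, seen_traceback)
def pvStepB (st : Option String × Bool) (raw : String) : Option String × Bool :=
  let line := PySem.Str.strip raw
  if line = "" then st
  else if !st.2 && PySem.Str.startswith line "Traceback" then (none, true)
  else if !pvIgnoredB line then (some line, st.2)
  else st

def pvStreamB (stream : String) : Option String :=
  ((PySem.Str.splitlines stream).foldl pvStepB (none, false)).1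

def summarize_blender_failure_py_alt (stdout : String) (stderr : String) : Option String :=
  match pvStreamB stderr with
  | some c => some c
  | none => pvStreamB stdout

-- ===== PRECONDITION & SPEC =====
def Spec_summarize_blender_failure_py (stdout : String) (stderr : String) (out : Option String) : Prop := out = summarize_blender_failure_py_alt stdout stderr
instance (stdout : String) (stderr : String) (out : Option String) : Decidable (Spec_summarize_blender_failure_py stdout stderr out) := by unfold Spec_summarize_blender_failure_py; infer_instance

-- ===== CLAIM (what is proved, stated in full; the proofs are below) =====
def Claim_equal_summarize_blender_failure_py : Prop := ∀ (stdout : String) (stderr : String), Dom_summarize_blender_failure_py stdout stderr → Spec_summarize_blender_failure_py stdout stderr (summarize_blender_failure_py stdout stderr)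

-- ===== LEMMAS AND PROOFS =====

-- abbreviations used only by the proofs
def pvOk (l : String) : Bool := !pvIgnoredA l
def pvTb (l : String) : Bool := PySem.Str.startswith l "Traceback"

theorem pvIgnored_eq (l : String) : pvIgnoredB l = pvIgnoredA l := rfl

-- B's step on a non-empty stripped line, expressed on the stripped value
def pvStepB' (st : Option String × Bool) (line : String) : Option String × Bool :=
  if !st.2 && pvTb line then (none, true)
  else if pvOk line then (some line, st.2)
  else st

-- folding B's step over the raw lines = folding the stripped step over A's cleaned line list
theorem pvFold_clean (raws : List String) (st : Option String × Bool) :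
    raws.foldl pvStepB st =
      (((raws.map PySem.Str.strip).filter (fun l => l != "")).foldl pvStepB' st) := by
  induction raws generalizing st with
  | nil => rfl
  | cons r rs ih =>
      by_cases h : PySem.Str.strip r = ""
      · simp [List.foldl_cons, pvStepB, h, ih]
      · have hb : (PySem.Str.strip r != "") = true := by simp [h]
        have hf : List.filter (fun l => l != "") (PySem.Str.strip r :: List.map PySem.Str.strip rs)
            = PySem.Str.strip r :: List.filter (fun l => l != "") (List.map PySem.Str.strip rs) :=
          List.filter_cons_of_pos hb
        rw [List.map_cons, hf]
        simp only [List.foldl_cons]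
        rw [ih]
        have hstep : pvStepB st r = pvStepB' st (PySem.Str.strip r) := by
          simp [pvStepB, pvStepB', h, pvOk, pvTb, pvIgnored_eq]
        rw [hstep]

-- once seen_traceback is true, the fold keeps the last "ok" line (or the incoming candidate)
theorem pvFold_true (ls : List String) (c : Option String) :
    ls.foldl pvStepB' (c, true) = ((ls.reverse.find? pvOk).or c, true) := by
  induction ls generalizing c with
  | nil => simp
  | cons l ls ih =>
      have hstep : pvStepB' (c, true) l = ((if pvOk l then some l else c), true) := by
        by_cases hk : pvOk l = true <;> simp [pvStepB', hk]
      simp only [List.foldl_cons, hstep, ih, List.reverse_cons, List.find?_append]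
      by_cases hk : pvOk l = true
      · cases ls.reverse.find? pvOk <;> simp [hk]
      · simp only [Bool.not_eq_true] at hk
        cases ls.reverse.find? pvOk <;> simp [hk]

-- the fold from the initial state computes exactly A's index/slice/reverse-scan result
theorem pvFold_false (ls : List String) (c : Option String) :
    (ls.foldl pvStepB' (c, false)).1 =
      match ls.findIdx? pvTb with
      | some i => (ls.drop (i + 1)).reverse.find? pvOk
      | none => (ls.reverse.find? pvOk).or c := by
  induction ls generalizing c with
  | nil => simp
  | cons l ls ih =>
      rw [List.findIdx?_cons]
      by_cases ht : pvTb l = true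
      · have hstep : pvStepB' (c, false) l = (none, true) := by simp [pvStepB', ht]
        simp only [List.foldl_cons, hstep, ht, if_true]
        rw [pvFold_true]
        simp
      · have hstep : pvStepB' (c, false) l = ((if pvOk l then some l else c), false) := by
          by_cases hk : pvOk l = true <;> simp [pvStepB', ht, hk]
        simp only [List.foldl_cons, hstep, if_neg ht]
        rw [ih]
        cases hfi : ls.findIdx? pvTb with
        | some i => simp [List.drop_succ_cons]
        | none =>
            simp only [Option.map_none, List.reverse_cons, List.find?_append]
            by_cases hk : pvOk l = true
            · cases ls.reverse.find? pvOk <;> simp [hk]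
            · simp only [Bool.not_eq_true] at hk
              cases ls.reverse.find? pvOk <;> simp [hk]

theorem pvStream_eq (stream : String) : pvStreamA stream = pvStreamB stream := by
  unfold pvStreamA pvStreamB
  dsimp only
  rw [pvFold_clean]
  have hl : ((PySem.Str.splitlines stream).map PySem.Str.strip).filter (fun l => l != "") = pvLinesA stream := rfl
  rw [hl, pvFold_false]
  have hti : pvTracebackIndexA (pvLinesA stream) = (pvLinesA stream).findIdx? pvTb := rfl
  have hok : (fun l => !pvIgnoredA l) = pvOk := rfl
  rw [hti, hok]
  cases hls : pvLinesA stream with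
  | nil => simp
  | cons a as =>
      rw [if_neg (by simp)]
      cases (a :: as).findIdx? pvTb with
      | some i => rfl
      | none => simp

-- ===== VERDICT (by name: the statement is the Claim_ definition above) =====
theorem summarize_blender_failure_py_spec : Claim_equal_summarize_blender_failure_py := by
  intro stdout stderr _
  unfold Spec_summarize_blender_failure_py summarize_blender_failure_py summarize_blender_failure_py_alt
  rw [pvStream_eq stderr, pvStream_eq stdout]
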